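-- pv_equiv track=rewrite | github.com/angrysky56/recurrent_bitnet | src/surgery.py | _build_layer_map
-- ===== SOURCE A (Python) =====
-- NUM_LAYERS = 24
--
-- ATTN_POSITION_IN_BLOCK = 3  # 0-indexed within each block of 4
--
-- def _build_layer_map(num_layers: int = NUM_LAYERS) -> dict[int, str]:
--     """Build a mapping of layer index → type for the 3:1 pattern."""
--     layer_map: dict[int, str] = {}
--     for i in range(num_layers):
--         if i % 4 == ATTN_POSITION_IN_BLOCK:
--             layer_map[i] = "attention"
--         else:
--             layer_map[i] = "deltanet"
--     return layer_map
-- ===== SOURCE B (Python) =====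
-- NUM_LAYERS = 24
--
-- ATTN_POSITION_IN_BLOCK = 3  # 0-indexed within each block of 4
--
-- def _build_layer_map(num_layers: int = NUM_LAYERS) -> dict[int, str]:
--     """Default-fill every layer as 'deltanet', then patch the attention slots in a strided pass."""
--     layer_map: dict[int, str] = dict.fromkeys(range(num_layers), "deltanet")
--     for i in range(ATTN_POSITION_IN_BLOCK, num_layers, 4):
--         layer_map[i] = "attention"
--     return layer_map
-- ===== Notes on version B (the rewrite author's own statement) =====
-- stated objective: alternative
-- what changed: Replaces the single loop with a per-element modulo branch by a default-fill of all keys to 'deltanet' followed by a second strided pass over only the attention positions (range(3, n, 4)) that overwrites those slots in place.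
import Mathlib
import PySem

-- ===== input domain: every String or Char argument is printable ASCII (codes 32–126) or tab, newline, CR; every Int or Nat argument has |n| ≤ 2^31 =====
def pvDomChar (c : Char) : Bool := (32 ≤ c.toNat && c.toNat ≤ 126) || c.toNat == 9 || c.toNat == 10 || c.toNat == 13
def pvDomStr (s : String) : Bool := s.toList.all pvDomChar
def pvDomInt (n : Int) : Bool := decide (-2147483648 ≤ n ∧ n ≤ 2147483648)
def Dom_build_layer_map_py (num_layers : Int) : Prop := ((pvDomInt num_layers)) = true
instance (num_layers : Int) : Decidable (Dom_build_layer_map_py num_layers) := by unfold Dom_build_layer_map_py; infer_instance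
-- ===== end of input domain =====

-- B replaces A's per-element modulo branch by a default-fill to "deltanet" plus a strided
-- overwrite pass over the attention positions; same return value, same cost (alternative).

-- ===== PORT A =====
def build_layer_map_py (num_layers : Int) : List (Int × String) :=
  ((PySem.List.pyRange 0 num_layers 1).foldl
      (fun layer_map i =>
        if PySem.Int.mod i 4 == 3 then layer_map.insert i "attention"
        else layer_map.insert i "deltanet")
      (PySem.Dict.empty : PySem.Dict Int String)).items

-- ===== PORT B =====
def build_layer_map_py_alt (num_layers : Int) : List (Int × String) :=
  let layer_map : PySem.Dict Int String :=
    (PySem.List.pyRange 0 num_layers 1).foldl (fun d i => d.insert i "deltanet")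
      PySem.Dict.empty
  ((PySem.List.pyRange 3 num_layers 4).foldl (fun d i => d.insert i "attention")
      layer_map).items

-- ===== PRECONDITION & SPEC =====
def Spec_build_layer_map_py (num_layers : Int) (out : List (Int × String)) : Prop := out = build_layer_map_py_alt num_layers
instance (num_layers : Int) (out : List (Int × String)) : Decidable (Spec_build_layer_map_py num_layers out) := by unfold Spec_build_layer_map_py; infer_instance

-- ===== CLAIM (what is proved, stated in full; the proofs are below) =====
def Claim_equal_build_layer_map_py : Prop := ∀ (num_layers : Int), Dom_build_layer_map_py num_layers → Spec_build_layer_map_py num_layers (build_layer_map_py num_layers)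

-- ===== LEMMAS AND PROOFS =====

-- the common value of both ports
def pvTarget (n : Int) : List (Int × String) :=
  (PySem.List.pyRange 0 n 1).map
    (fun i => (i, if PySem.Int.mod i 4 == 3 then "attention" else "deltanet"))

theorem portA_eq_target (n : Int) : build_layer_map_py n = pvTarget n := by
  unfold build_layer_map_py pvTarget
  have hfn : (fun (d : PySem.Dict Int String) i =>
        if PySem.Int.mod i 4 == 3 then d.insert i "attention" else d.insert i "deltanet")
      = fun (d : PySem.Dict Int String) i =>
        d.insert i (if PySem.Int.mod i 4 == 3 then "attention" else "deltanet") := by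
    funext d i
    exact (apply_ite (fun v => d.insert i v) ((PySem.Int.mod i 4 == 3) = true) _ _).symm
  rw [hfn]
  have hA := PySem.Dict.items_foldl_insert_fresh (PySem.List.pyRange 0 n 1) (fun a => a)
      (fun i => if PySem.Int.mod i 4 == 3 then "attention" else "deltanet")
      PySem.Dict.empty
      (by intro a _; simp [PySem.Dict.contains_empty])
      (by simpa using PySem.List.nodup_pyRange_one 0 n)
  simpa using hA

theorem items_foldl_insert_const (v : String) (l : List Int) :
    ∀ (d : PySem.Dict Int String), (∀ i ∈ l, d.contains i = true) →
    (l.foldl (fun d i => d.insert i v) d).items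
      = d.items.map (fun p => if p.1 ∈ l then (p.1, v) else p) := by
  induction l with
  | nil => intro d _; simp
  | cons i l ih =>
      intro d h
      have hi : d.contains i = true := h i (List.mem_cons_self ..)
      have hrec := ih (d.insert i v) (by
        intro j hj
        rw [PySem.Dict.contains_insert]
        simp [h j (List.mem_cons_of_mem _ hj)])
      simp only [List.foldl_cons]
      rw [hrec, PySem.Dict.items_insert_of_contains d v hi, List.map_map]
      refine List.map_congr_left ?_
      intro p _
      by_cases hpi : p.1 = i
      · by_cases hpl : p.1 ∈ l <;> simp [hpi, hpl]
      · have : (p.1 == i) = false := by simpa using hpi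
        by_cases hpl : p.1 ∈ l <;> simp [this, hpi, hpl]

theorem keys_d0 (n : Int) :
    ((PySem.List.pyRange 0 n 1).foldl (fun d i => d.insert i "deltanet")
        (PySem.Dict.empty : PySem.Dict Int String)).items
      = (PySem.List.pyRange 0 n 1).map (fun i => (i, "deltanet")) := by
  have hA := PySem.Dict.items_foldl_insert_fresh (PySem.List.pyRange 0 n 1) (fun a => a)
      (fun _ => "deltanet") PySem.Dict.empty
      (by intro a _; simp [PySem.Dict.contains_empty])
      (by simpa using PySem.List.nodup_pyRange_one 0 n)
  simpa using hA

theorem pv_mod4 (i : Int) : PySem.Int.mod i 4 = i % 4 := by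
  show Int.fmod i 4 = i % 4
  rw [Int.fmod_eq_emod]
  norm_num

theorem mem_r4_iff (n i : Int) (h0 : 0 ≤ i) (hn : i < n) :
    i ∈ PySem.List.pyRange 3 n 4 ↔ (PySem.Int.mod i 4 == 3) = true := by
  rw [PySem.List.mem_pyRange_iff_of_pos (by norm_num)]
  simp only [pv_mod4, beq_iff_eq]
  constructor
  · rintro ⟨h3, -, hd⟩
    omega
  · intro hm
    exact ⟨by omega, hn, by omega⟩

theorem portB_eq_target (n : Int) : build_layer_map_py_alt n = pvTarget n := by
  unfold build_layer_map_py_alt pvTarget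
  simp only []
  have hcont : ∀ i ∈ PySem.List.pyRange 3 n 4,
      ((PySem.List.pyRange 0 n 1).foldl (fun d i => d.insert i "deltanet")
        (PySem.Dict.empty : PySem.Dict Int String)).contains i = true := by
    intro i hi
    rw [PySem.Dict.contains_iff_mem_keys]
    have := (PySem.List.mem_pyRange_iff_of_pos (a := 3) (b := n) (s := 4) (by norm_num) i).mp hi
    have hmem : i ∈ PySem.List.pyRange 0 n 1 :=
      (PySem.List.mem_pyRange_one).mpr ⟨by omega, this.2.1⟩
    simp only [PySem.Dict.keys, keys_d0, List.map_map]
    simpa using hmem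
  rw [items_foldl_insert_const "attention" (PySem.List.pyRange 3 n 4) _ hcont, keys_d0,
    List.map_map]
  refine List.map_congr_left ?_
  intro i hi
  have h01 := (PySem.List.mem_pyRange_one).mp hi
  by_cases h4 : i ∈ PySem.List.pyRange 3 n 4
  · have hm := (mem_r4_iff n i h01.1 h01.2).mp h4
    simp only [pv_mod4, beq_iff_eq] at hm
    simp [h4, hm]
  · have hm : ¬ ((PySem.Int.mod i 4 == 3) = true) :=
      fun hc => h4 ((mem_r4_iff n i h01.1 h01.2).mpr hc)
    simp only [pv_mod4, beq_iff_eq] at hm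
    simp [h4, hm]

-- ===== VERDICT (by name: the statement is the Claim_ definition above) =====
theorem build_layer_map_py_spec : Claim_equal_build_layer_map_py := by
  intro n _
  unfold Spec_build_layer_map_py
  rw [portA_eq_target, portB_eq_target]
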